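-- pv_equiv track=rewrite | github.com/AndrewDowns/AdventOfCode | Day 10/Puzzle20.py | getDeviceJolt
-- ===== SOURCE A (Python) =====
-- def getDeviceJolt(data):
--     next = 0
--     for i in range(len(data)):
--         current = data[i]
--         if i+1==len(data):
--             next = current+3
--         else:
--             next = data[i+1]
--     return next
-- ===== SOURCE B (Python) =====
-- def getDeviceJolt(data):
--     return data[-1] + 3 if data else 0
-- ===== Notes on version B (the rewrite author's own statement) =====
-- stated objective: simpler
-- what changed: Replaces the index loop (whose accumulator only ever keeps the value of its final iteration) with a closed-form expression: the last element plus 3 for non-empty input, 0 for the empty list.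
import Mathlib
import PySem

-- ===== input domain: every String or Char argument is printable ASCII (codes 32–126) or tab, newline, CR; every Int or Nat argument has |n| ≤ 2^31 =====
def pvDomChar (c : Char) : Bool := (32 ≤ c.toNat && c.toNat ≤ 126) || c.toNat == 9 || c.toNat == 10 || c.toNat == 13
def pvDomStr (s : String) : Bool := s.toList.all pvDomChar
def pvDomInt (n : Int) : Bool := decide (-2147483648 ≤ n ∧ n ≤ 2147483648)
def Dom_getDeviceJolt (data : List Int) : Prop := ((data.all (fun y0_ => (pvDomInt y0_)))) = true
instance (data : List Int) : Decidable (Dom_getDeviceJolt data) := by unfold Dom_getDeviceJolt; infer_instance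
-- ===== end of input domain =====

-- B replaces A's index loop (whose accumulator only ever keeps the last iteration's value)
-- with a closed-form expression: the last element plus 3 for non-empty input, 0 for the empty list.


-- ===== PORT A =====
-- Literal port of A's loop: for i in range(len(data)): if i+1==len(data): next = data[i]+3 else: next = data[i+1].
-- Indices i and i+1 read by the loop are always in range, so pyGetD with default 0 is exact here.
def getDeviceJolt (data : List Int) : Int :=
  (PySem.List.pyRange 0 (data.length : Int) 1).foldl
    (fun _next i =>
      let current := PySem.List.pyGetD data i 0
      if i + 1 = (data.length : Int) then current + 3
      else PySem.List.pyGetD data (i + 1) 0)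
    0

-- ===== PORT B =====
def getDeviceJolt_alt (data : List Int) : Int :=
  match data.getLast? with
  | some x => x + 3
  | none => 0

-- ===== PRECONDITION & SPEC =====
def Spec_getDeviceJolt (data : List Int) (out : Int) : Prop := out = getDeviceJolt_alt data
instance (data : List Int) (out : Int) : Decidable (Spec_getDeviceJolt data out) := by unfold Spec_getDeviceJolt; infer_instance

-- ===== CLAIM (what is proved, stated in full; the proofs are below) =====
def Claim_equal_getDeviceJolt : Prop := ∀ (data : List Int), Dom_getDeviceJolt data → Spec_getDeviceJolt data (getDeviceJolt data)

-- ===== LEMMAS AND PROOFS =====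

-- The loop's accumulator is ignored by its body, so over a non-empty range the result
-- is the body applied to the last index.
theorem foldl_const_body_last (g : Int → Int) (a : Int) (n : Nat) :
    (PySem.List.pyRange 0 ((n + 1 : Nat) : Int) 1).foldl (fun _ i => g i) a = g (n : Int) := by
  have h : ((n + 1 : Nat) : Int) = (n : Int) + 1 := by push_cast; ring
  rw [h, PySem.List.pyRange_one_succ_right (by positivity), List.foldl_append]
  simp

-- ===== VERDICT (by name: the statement is the Claim_ definition above) =====
theorem getDeviceJolt_spec : Claim_equal_getDeviceJolt := by
  intro data _
  unfold Spec_getDeviceJolt getDeviceJolt getDeviceJolt_alt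
  rcases h : data.getLast? with _ | x
  · simp [List.getLast?_eq_none_iff.mp h, PySem.List.pyRange]
  · have hne : data ≠ [] := by
      intro he; rw [he] at h; simp at h
    obtain ⟨m, hm⟩ : ∃ m, data.length = m + 1 :=
      ⟨data.length - 1, by have := List.length_pos_iff.mpr hne; omega⟩
    rw [hm, foldl_const_body_last]
    rw [if_pos (by push_cast; ring)]
    have hg : PySem.List.pyGetD data (m : Int) 0 = data.getLast hne := by
      rw [PySem.List.pyGetD_natCast, List.getLast_eq_getElem]
      simp [List.getD, hm]
    rw [List.getLast?_eq_some_getLast hne] at h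
    simp only [Option.some.injEq] at h
    rw [hg, h]
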